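-- pv_equiv track=rewrite | github.com/ArthurTakase/Epitech-Bundle | B4 - Mathematics/208dowels/src/merge.py | uncodeHeader
-- ===== SOURCE A (Python) =====
-- from typing import List
--
-- def uncodeHeader(header: List[int], O: List[int]) -> List[List[int]]:
--     newHeader: List[List[int]] = []
--     i: int = 0
--     j: int = 0
--
--     while i < len(header):
--         tempHeader: List[int] = []
--
--         if header[i] != O[j]:
--             tempO: int = O[j]
--             tempHeader.append(j)
--             while tempO != header[i]:
--                 j += 1
--                 tempO += O[j]
--                 tempHeader.append(j)
--             newHeader.append(tempHeader)
--         else: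
--             newHeader.append([j])
--         i += 1
--         j += 1
--
--     return newHeader
-- ===== SOURCE B (Python) =====
-- from typing import List
--
-- def uncodeHeader(header: List[int], O: List[int]) -> List[List[int]]:
--     # Prefix sums once; each group is the index range between consecutive
--     # prefix-sum matches, so no per-element accumulator or group list is kept.
--     ps: List[int] = [0]
--     t: int = 0
--     for x in O:
--         t += x
--         ps.append(t)
--     res: List[List[int]] = []
--     j: int = 0
--     for h in header:
--         target: int = ps[j] + h
--         k: int = j + 1
--         while ps[k] != target:
--             k += 1
--         res.append(list(range(j, k)))
--         j = k
--     return res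
-- ===== Notes on version B (the rewrite author's own statement) =====
-- stated objective: alternative
-- what changed: B precomputes the prefix-sum table of O once and finds each group as the index range up to the next prefix sum matching ps[j]+header[i], instead of A's nested while loops that re-accumulate a running sum element by element with a special case for single-element groups.
import Mathlib
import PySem

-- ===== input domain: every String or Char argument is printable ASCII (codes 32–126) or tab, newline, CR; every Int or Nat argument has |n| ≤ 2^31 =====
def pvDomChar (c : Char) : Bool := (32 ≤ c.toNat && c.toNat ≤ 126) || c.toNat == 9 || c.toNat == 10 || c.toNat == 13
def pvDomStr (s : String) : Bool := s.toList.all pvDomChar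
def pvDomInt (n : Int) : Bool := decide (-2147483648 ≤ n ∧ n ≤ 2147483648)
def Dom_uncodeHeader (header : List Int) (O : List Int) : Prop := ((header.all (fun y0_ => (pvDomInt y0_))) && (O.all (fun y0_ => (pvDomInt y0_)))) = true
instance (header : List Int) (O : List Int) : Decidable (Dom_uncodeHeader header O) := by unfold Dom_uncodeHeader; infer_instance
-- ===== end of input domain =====

-- B replaces A's nested accumulate-until-match loops by a precomputed prefix-sum
-- table scanned for the next matching boundary, groups emitted as index ranges
-- (objective: alternative decomposition, same cost).

-- ===== PORT A =====
-- inner 'while tempO != header[i]' loop; j only increments and is never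
-- negative, so Nat indexing via getElem? is exact Python indexing (none = IndexError).
def pvInnerA (O : List Int) (hi : Int) (tempO : Int) (j : Nat) (tempHeader : List Int) :
    Option (Nat × List Int) :=
  if tempO = hi then some (j, tempHeader)
  else
    match hO : O[j+1]? with
    | none => none                    -- IndexError
    | some v => pvInnerA O hi (tempO + v) (j+1) (tempHeader ++ [((j:Int)+1)])
termination_by O.length - j
decreasing_by
  obtain ⟨hlt, -⟩ := List.getElem?_eq_some_iff.mp hO
  omega

-- outer 'while i < len(header)' loop, recursing on the remaining header
def pvOuterA (O : List Int) : List Int → Nat → List (List Int) → Option (List (List Int))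
  | [], _, newHeader => some newHeader
  | h :: hs, j, newHeader =>
    match O[j]? with
    | none => none                    -- IndexError on O[j]
    | some oj =>
      if h ≠ oj then
        match pvInnerA O h oj j [(j:Int)] with
        | none => none
        | some (j', grp) => pvOuterA O hs (j'+1) (newHeader ++ [grp])
      else pvOuterA O hs (j+1) (newHeader ++ [[(j:Int)]])

def uncodeHeader (header : List Int) (O : List Int) : List (List Int) :=
  (pvOuterA O header 0 []).getD []    -- none = Python raises; outside Pre_, value irrelevant

-- ===== PORT B =====
-- 'for x in O: t += x; ps.append(t)'
def pvPsAux : List Int → List Int → Int → List Int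
  | [], ps, _ => ps
  | x :: xs, ps, t => pvPsAux xs (ps ++ [t + x]) (t + x)

-- 'while ps[k] != target: k += 1'; k starts at j+1 ≥ 0, Nat indexing exact
def pvInnerB (ps : List Int) (target : Int) (k : Nat) : Option Nat :=
  match hP : ps[k]? with
  | none => none                      -- IndexError
  | some v => if v ≠ target then pvInnerB ps target (k+1) else some k
termination_by ps.length - k
decreasing_by
  obtain ⟨hlt, -⟩ := List.getElem?_eq_some_iff.mp hP
  omega

-- 'for h in header' loop
def pvOuterB (ps : List Int) : List Int → Nat → List (List Int) → Option (List (List Int))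
  | [], _, res => some res
  | h :: hs, j, res =>
    match ps[j]? with
    | none => none
    | some pj =>
      match pvInnerB ps (pj + h) (j+1) with
      | none => none
      | some k => pvOuterB ps hs k (res ++ [PySem.List.pyRange (j:Int) (k:Int) 1])

def uncodeHeader_alt (header : List Int) (O : List Int) : List (List Int) :=
  (pvOuterB (pvPsAux O [0] 0) header 0 []).getD []

-- ===== PRECONDITION & SPEC =====
-- Pre_ = exactly the inputs on which the Python A returns (elsewhere both raise
-- IndexError): each header value must be matched by some later prefix sum of O,
-- group boundaries advancing to the first match.
def pvPreGo (O : List Int) : List Int → Nat → Bool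
  | [], _ => true
  | h :: hs, j =>
    match (List.range (O.length + 1)).find? (fun k => j < k && ((O.take k).sum == (O.take j).sum + h)) with
    | none => false
    | some k => pvPreGo O hs k

def Pre_uncodeHeader (header : List Int) (O : List Int) : Prop := pvPreGo O header 0 = true
instance (header : List Int) (O : List Int) : Decidable (Pre_uncodeHeader header O) := by unfold Pre_uncodeHeader; infer_instance
def pvWitness_uncodeHeader : List Int × List Int := ([3, 1, 2], [1, 2, 1, 1, 1])

def Spec_uncodeHeader (header : List Int) (O : List Int) (out : List (List Int)) : Prop := out = uncodeHeader_alt header O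
instance (header : List Int) (O : List Int) (out : List (List Int)) : Decidable (Spec_uncodeHeader header O out) := by unfold Spec_uncodeHeader; infer_instance

-- ===== CLAIM (what is proved, stated in full; the proofs are below) =====
def Claim_equal_uncodeHeader : Prop := ∀ (header : List Int) (O : List Int), Dom_uncodeHeader header O → Pre_uncodeHeader header O → Spec_uncodeHeader header O (uncodeHeader header O)

-- ===== LEMMAS AND PROOFS =====

-- unfolding lemmas for the two well-founded loops
lemma pvInnerA_stop (O : List Int) (hi tempO : Int) (j : Nat) (acc : List Int)
    (h : tempO = hi) : pvInnerA O hi tempO j acc = some (j, acc) := by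
  rw [pvInnerA, if_pos h]

lemma pvInnerA_step (O : List Int) (hi tempO : Int) (j : Nat) (acc : List Int) (v : Int)
    (hne : tempO ≠ hi) (hv : O[j+1]? = some v) :
    pvInnerA O hi tempO j acc = pvInnerA O hi (tempO + v) (j+1) (acc ++ [((j:Int)+1)]) := by
  rw [pvInnerA, if_neg hne]
  split
  · simp_all
  · rename_i v' hv'
    rw [hv] at hv'
    cases hv'
    rfl

lemma pvInnerA_none (O : List Int) (hi tempO : Int) (j : Nat) (acc : List Int)
    (hne : tempO ≠ hi) (hv : O[j+1]? = none) : pvInnerA O hi tempO j acc = none := by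
  rw [pvInnerA, if_neg hne]
  split
  · rfl
  · simp_all

lemma pvInnerB_none (ps : List Int) (target : Int) (k : Nat)
    (h : ps[k]? = none) : pvInnerB ps target k = none := by
  rw [pvInnerB]
  split
  · rfl
  · simp_all

lemma pvInnerB_some (ps : List Int) (target : Int) (k : Nat) (v : Int)
    (h : ps[k]? = some v) :
    pvInnerB ps target k = if v ≠ target then pvInnerB ps target (k+1) else some k := by
  rw [pvInnerB]
  split
  · simp_all
  · rename_i v' hv'
    rw [h] at hv'
    cases hv'
    rfl

-- tail of the prefix-sum scan
def pvTailScan : Int → List Int → List Int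
  | _, [] => []
  | t, x :: xs => (t + x) :: pvTailScan (t + x) xs

lemma pvPsAux_eq : ∀ (xs ps : List Int) (t : Int), pvPsAux xs ps t = ps ++ pvTailScan t xs := by
  intro xs
  induction xs with
  | nil => intro ps t; simp [pvPsAux, pvTailScan]
  | cons x xs ih => intro ps t; simp [pvPsAux, pvTailScan, ih]

lemma pvTailScan_getElem? : ∀ (xs : List Int) (t : Int) (i : Nat),
    (pvTailScan t xs)[i]? = if i < xs.length then some (t + (xs.take (i+1)).sum) else none := by
  intro xs
  induction xs with
  | nil => intro t i; simp [pvTailScan]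
  | cons x xs ih =>
    intro t i
    cases i with
    | zero => simp [pvTailScan]
    | succ i =>
      simp only [pvTailScan, List.getElem?_cons_succ, ih (t + x) i, List.length_cons,
        List.take_succ_cons, List.sum_cons]
      split_ifs with h h2 h3 <;> first | (congr 1; ring) | rfl | omega

def pvPs (O : List Int) : List Int := pvPsAux O [0] 0

lemma pvPs_getElem? (O : List Int) (i : Nat) :
    (pvPs O)[i]? = if i ≤ O.length then some ((O.take i).sum) else none := by
  unfold pvPs
  rw [pvPsAux_eq]
  cases i with
  | zero => simp
  | succ i =>
    have h0 : ([(0:Int)] ++ pvTailScan 0 O)[i+1]? = (pvTailScan 0 O)[i]? := by simp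
    rw [h0, pvTailScan_getElem?]
    split_ifs with h h2 h3 <;> first | simp | omega

-- inner-loop correspondence: A's running sum vs B's prefix-sum scan
lemma pvInner_eq (O : List Int) (h target : Int) :
    ∀ (n m : Nat) (tempO : Int) (acc : List Int), O.length - m = n → m < O.length →
      tempO - h = (O.take (m+1)).sum - target →
      (match pvInnerB (pvPs O) target (m+1) with
       | none => pvInnerA O h tempO m acc = none
       | some k => m + 1 ≤ k ∧ k ≤ O.length ∧
           pvInnerA O h tempO m acc = some (k - 1, acc ++ PySem.List.pyRange ((m:Int)+1) (k:Int) 1)) := by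
  intro n
  induction n using Nat.strong_induction_on with
  | _ n ih =>
    intro m tempO acc hn hm ht
    have hget : (pvPs O)[m+1]? = some ((O.take (m+1)).sum) := by
      rw [pvPs_getElem?, if_pos (by omega)]
    rw [pvInnerB_some (pvPs O) target (m+1) _ hget]
    by_cases heq : (O.take (m+1)).sum = target
    · -- both stop here
      have htempO : tempO = h := by omega
      rw [if_neg (by simp [heq])]
      refine ⟨Nat.le_refl _, by omega, ?_⟩
      rw [pvInnerA_stop O h tempO m acc htempO]
      have hnil : PySem.List.pyRange ((m:Int)+1) (((m+1:Nat)):Int) 1 = [] :=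
        PySem.List.pyRange_one_eq_nil (by push_cast; omega)
      rw [hnil]
      simp
    · rw [if_pos (by simp [heq])]
      have htempO : tempO ≠ h := by intro hc; apply heq; omega
      by_cases hm1 : m + 1 < O.length
      · -- next element exists; both advance in lockstep
        have hv : O[m+1]? = some O[m+1] := List.getElem?_eq_getElem hm1
        rw [pvInnerA_step O h tempO m acc O[m+1] htempO hv]
        have hsum : (O.take (m+1+1)).sum = (O.take (m+1)).sum + O[m+1] :=
          List.sum_take_succ O (m+1) hm1
        have hrec := ih (O.length - (m+1)) (by omega) (m+1) (tempO + O[m+1])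
          (acc ++ [((m:Int)+1)]) rfl hm1 (by omega)
        revert hrec
        cases hB : pvInnerB (pvPs O) target (m+1+1) with
        | none => intro hrec; exact hrec
        | some k =>
          rintro ⟨h1, h2, h3⟩
          refine ⟨by omega, h2, ?_⟩
          rw [h3]
          have hcons : PySem.List.pyRange ((m:Int)+1) (k:Int) 1 =
              ((m:Int)+1) :: PySem.List.pyRange ((m:Int)+1+1) (k:Int) 1 :=
            PySem.List.pyRange_one_cons (by omega)
          have hcast : (((m+1:Nat)):Int) = (m:Int)+1 := by push_cast; ring
          rw [hcast, hcons]
          simp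
      · -- O exhausted: both raise IndexError
        have hv : O[m+1]? = none := List.getElem?_eq_none (by omega)
        rw [pvInnerA_none O h tempO m acc htempO hv,
          pvInnerB_none (pvPs O) target (m+1+1)
            (by rw [pvPs_getElem?, if_neg (by omega)])]

-- outer-loop correspondence
lemma pvOuter_eq (O : List Int) :
    ∀ (hs : List Int) (j : Nat), j ≤ O.length →
      ∀ (accL : List (List Int)),
      pvOuterA O hs j accL = pvOuterB (pvPs O) hs j accL := by
  intro hs
  induction hs with
  | nil => intro j hj accL; rfl
  | cons h hs ih =>
    intro j hj accL
    rw [pvOuterA, pvOuterB]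
    have hpj : (pvPs O)[j]? = some ((O.take j).sum) := by
      rw [pvPs_getElem?, if_pos hj]
    rw [hpj]
    by_cases hjlen : j < O.length
    · have hOj : O[j]? = some O[j] := List.getElem?_eq_getElem hjlen
      rw [hOj]
      simp only
      have hsum : (O.take (j+1)).sum = (O.take j).sum + O[j] := List.sum_take_succ O j hjlen
      by_cases hne : h = O[j]
      · -- A takes the 'else' branch; B's scan succeeds immediately at k = j+1
        rw [if_neg (by simp [hne])]
        have hget1 : (pvPs O)[j+1]? = some ((O.take (j+1)).sum) := by
          rw [pvPs_getElem?, if_pos (by omega)]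
        rw [pvInnerB_some (pvPs O) ((O.take j).sum + h) (j+1) _ hget1,
          if_neg (by simp; omega)]
        simp only
        have hr : PySem.List.pyRange ((j:Nat):Int) (((j+1:Nat)):Int) 1 = [((j:Nat):Int)] := by
          have hcast : (((j+1:Nat)):Int) = ((j:Nat):Int)+1 := by push_cast; ring
          rw [hcast]
          exact PySem.List.pyRange_one_singleton _
        rw [hr]
        exact ih (j+1) (by omega) _
      · rw [if_pos (by simp [hne])]
        have hinner := pvInner_eq O h ((O.take j).sum + h) (O.length - j) j O[j] [(j:Int)]
          rfl hjlen (by omega)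
        revert hinner
        cases hB : pvInnerB (pvPs O) ((O.take j).sum + h) (j+1) with
        | none => intro hinner; rw [hinner]
        | some k =>
          rintro ⟨h1, h2, h3⟩
          rw [h3]
          simp only
          have hk1 : k - 1 + 1 = k := by omega
          rw [hk1]
          have hgrp : PySem.List.pyRange ((j:Nat):Int) (k:Int) 1 =
              ((j:Nat):Int) :: PySem.List.pyRange (((j:Nat):Int)+1) (k:Int) 1 :=
            PySem.List.pyRange_one_cons (by omega)
          rw [hgrp]
          simp only [List.singleton_append]
          exact ih k h2 _
    · -- j = O.length: A raises on O[j], B raises scanning past ps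
      have hOj : O[j]? = none := List.getElem?_eq_none (by omega)
      have hbn : pvInnerB (pvPs O) ((O.take j).sum + h) (j+1) = none :=
        pvInnerB_none _ _ _ (by rw [pvPs_getElem?, if_neg (by omega)])
      rw [hOj]
      simp [hbn]

lemma pv_total_eq (header O : List Int) : uncodeHeader header O = uncodeHeader_alt header O := by
  unfold uncodeHeader uncodeHeader_alt
  rw [pvOuter_eq O header 0 (Nat.zero_le _) []]
  rfl

-- ===== VERDICT (by name: the statement is the Claim_ definition above) =====
theorem uncodeHeader_spec : Claim_equal_uncodeHeader := by
  intro header O _ _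
  exact pv_total_eq header O
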